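-- pv_equiv track=rewrite | github.com/haile12michael12/ai-code-review-assignment | correct_task2.py | count_valid_emails
-- ===== SOURCE A (Python) =====
-- def count_valid_emails(emails):
--     count = 0
--
--     for email in emails:
--         # Basic check: '@' must exist, not be the first/last char,
--         # and must have a '.' in the domain part
--         if "@" in email and not email.startswith("@") and not email.endswith("@"):
--             parts = email.split("@")
--             if len(parts) == 2 and "." in parts[1]:
--                 count += 1
--
--     return count
-- ===== SOURCE B (Python) =====
-- def count_valid_emails(emails):
--     # Single left-to-right state-machine pass per email (no split/scan passes).
--     def _ok(email):
--         state = 0  # 0: start, 1: in local part, 2: in domain (no dot yet), 3: domain with dot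
--         for ch in email:
--             if state == 0:
--                 if ch == '@':
--                     return False
--                 state = 1
--             elif state == 1:
--                 if ch == '@':
--                     state = 2
--             else:
--                 if ch == '@':
--                     return False
--                 if ch == '.':
--                     state = 3
--         return state == 3
--     return sum(1 for email in emails if _ok(email))
-- ===== Notes on version B (the rewrite author's own statement) =====
-- stated objective: alternative
-- what changed: Each email is validated by a single left-to-right state-machine pass (states: start / local part / domain without dot / domain with dot) instead of A's several passes per email (substring test, startswith, endswith, split on '@', dot test on the second part), and the count is a sum over that predicate.
import Mathlib
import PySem

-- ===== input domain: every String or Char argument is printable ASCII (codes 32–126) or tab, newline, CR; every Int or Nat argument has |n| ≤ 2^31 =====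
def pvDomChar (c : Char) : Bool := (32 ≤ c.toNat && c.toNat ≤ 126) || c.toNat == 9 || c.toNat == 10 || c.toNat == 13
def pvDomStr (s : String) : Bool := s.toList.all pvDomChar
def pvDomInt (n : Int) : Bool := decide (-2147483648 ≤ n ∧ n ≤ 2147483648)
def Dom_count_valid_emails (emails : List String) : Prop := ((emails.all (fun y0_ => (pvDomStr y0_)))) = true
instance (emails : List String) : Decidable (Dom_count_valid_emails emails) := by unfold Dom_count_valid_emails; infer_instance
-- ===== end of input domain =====

-- B replaces A's multi-pass per-email check (substring test, startswith/endswith, split) by a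
-- single left-to-right state-machine pass per email; objective: alternative (same O(total chars) cost).


-- ===== PORT A =====
-- Literal port of A: for each email, '@' membership, startswith/endswith, split on '@',
-- then len(parts) == 2 and '.' in parts[1] (rendered as the two-element match, which is
-- exactly Python's short-circuited 'len(parts) == 2 and "." in parts[1]').
def count_valid_emails (emails : List String) : Int :=
  emails.foldl (fun count email =>
    if PySem.Str.isIn "@" email && !(PySem.Str.startswith email "@") && !(PySem.Str.endswith email "@") then
      match PySem.Str.split? email "@" with
      | some [_, p1] => if PySem.Str.isIn "." p1 then count + 1 else count
      | _ => count
    else count) 0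

-- ===== PORT B =====
-- B's per-email state machine: 0 start, 1 in local part, 2 in domain (no dot yet), 3 domain with dot.
-- A '@' in states 0, 2, 3 (or running out of input before state 3) means invalid.
def okFrom : Nat → List Char → Bool
  | 3, [] => true
  | _, [] => false
  | 0, c :: t => if c = '@' then false else okFrom 1 t
  | 1, c :: t => if c = '@' then okFrom 2 t else okFrom 1 t
  | s, c :: t => if c = '@' then false else if c = '.' then okFrom 3 t else okFrom s t

def pyOk (email : String) : Bool := okFrom 0 email.toList

-- sum(1 for email in emails if _ok(email))
def count_valid_emails_alt (emails : List String) : Int :=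
  Int.ofNat (emails.countP pyOk)

-- ===== PRECONDITION & SPEC =====
def Spec_count_valid_emails (emails : List String) (out : Int) : Prop := out = count_valid_emails_alt emails
instance (emails : List String) (out : Int) : Decidable (Spec_count_valid_emails emails out) := by unfold Spec_count_valid_emails; infer_instance

-- ===== CLAIM (what is proved, stated in full; the proofs are below) =====
def Claim_equal_count_valid_emails : Prop := ∀ (emails : List String), Dom_count_valid_emails emails → Spec_count_valid_emails emails (count_valid_emails emails)

-- ===== LEMMAS AND PROOFS =====

-- A's per-email condition, moved to the char-list level (validA_eq below bridges it).
def splitGo : List Char → List Char → List (List Char)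
  | [], cur => [cur.reverse]
  | c :: rest, cur => if c = '@' then cur.reverse :: splitGo rest [] else splitGo rest (c :: cur)

def validA (l : List Char) : Bool :=
  PySem.Chars.isIn ['@'] l && !(PySem.Chars.startswith l ['@']) && !(PySem.Chars.endswith l ['@']) &&
    (match splitGo l [] with
     | [_, p1] => PySem.Chars.isIn ['.'] p1
     | _ => false)

theorem splitOn_go_eq (fuel : Nat) (l cur : List Char) (acc : List (List Char))
    (h : l.length ≤ fuel) :
    PySem.Chars.splitOn.go ['@'] fuel l cur acc = acc.reverse ++ splitGo l cur := by
  induction fuel generalizing l cur acc with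
  | zero =>
    have : l = [] := by cases l <;> simp_all
    subst this
    simp [PySem.Chars.splitOn.go, splitGo]
  | succ f ih =>
    cases l with
    | nil => simp [PySem.Chars.splitOn.go, splitGo]
    | cons c rest =>
      by_cases hc : c = '@'
      · subst hc
        have hpre : List.isPrefixOf ['@'] ('@' :: rest) = true := by
          simp [List.isPrefixOf]
        simp only [PySem.Chars.splitOn.go, splitGo, hpre, if_true, if_pos rfl,
          List.length_singleton, List.drop_succ_cons, List.drop_zero]
        rw [ih rest [] (cur.reverse :: acc) (by simpa using Nat.le_of_succ_le_succ h)]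
        simp
      · have hpre : List.isPrefixOf ['@'] (c :: rest) = false := by
          simp [List.isPrefixOf]
          exact fun h => absurd h.symm hc
        simp only [PySem.Chars.splitOn.go, splitGo, hpre, Bool.false_eq_true, if_false, if_neg hc]
        exact ih rest (c :: cur) acc (by simpa using Nat.le_of_succ_le_succ h)

theorem splitOn_char (l : List Char) :
    PySem.Chars.splitOn l ['@'] = splitGo l [] := by
  unfold PySem.Chars.splitOn
  simpa using splitOn_go_eq (l.length + 1) l [] [] (by omega)

theorem sg_no (l cur : List Char) (h : '@' ∉ l) : splitGo l cur = [cur.reverse ++ l] := by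
  induction l generalizing cur with
  | nil => simp [splitGo]
  | cons c t ih =>
    have hc : c ≠ '@' := by intro hc; exact h (hc ▸ List.mem_cons_self ..)
    simp [splitGo, hc, ih (c :: cur) (fun hm => h (List.mem_cons_of_mem _ hm))]

theorem sg_len (l cur : List Char) : (splitGo l cur).length = l.count '@' + 1 := by
  induction l generalizing cur with
  | nil => simp [splitGo]
  | cons c t ih =>
    by_cases hc : c = '@' <;> simp [splitGo, hc, ih, List.count_cons]

theorem sg_split (a b cur : List Char) (ha : '@' ∉ a) (hb : '@' ∉ b) :
    splitGo (a ++ '@' :: b) cur = [cur.reverse ++ a, b] := by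
  induction a generalizing cur with
  | nil => simp [splitGo, sg_no b [] hb]
  | cons c t ih =>
    have hc : c ≠ '@' := by intro hc; exact ha (hc ▸ List.mem_cons_self ..)
    have := ih (c :: cur) (fun hm => ha (List.mem_cons_of_mem _ hm))
    simp [splitGo, hc, this]

theorem isIn_singleton (c : Char) (l : List Char) :
    PySem.Chars.isIn [c] l = l.contains c := by
  apply Bool.coe_iff_coe.mp
  rw [PySem.Chars.isIn_iff_infix, List.singleton_infix_iff, List.contains_iff_mem]

theorem ok1_skip (a r : List Char) (ha : '@' ∉ a) : okFrom 1 (a ++ r) = okFrom 1 r := by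
  induction a with
  | nil => rfl
  | cons c t ih =>
    have hc : c ≠ '@' := by intro hc; exact ha (hc ▸ List.mem_cons_self ..)
    simp [okFrom, hc, ih (fun hm => ha (List.mem_cons_of_mem _ hm))]

theorem ok3_eq (b : List Char) : okFrom 3 b = !b.contains '@' := by
  induction b with
  | nil => rfl
  | cons c t ih =>
    by_cases hc : c = '@'
    · simp [okFrom, hc]
    · by_cases hd : c = '.'
      · simp [okFrom, hc, hd, ih, Ne.symm hc]
      · simp [okFrom, hc, hd, ih, Ne.symm hc, Ne.symm hd]

theorem ok2_eq (b : List Char) : okFrom 2 b = (!b.contains '@' && b.contains '.') := by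
  induction b with
  | nil => rfl
  | cons c t ih =>
    by_cases hc : c = '@'
    · simp [okFrom, hc]
    · by_cases hd : c = '.'
      · simp [okFrom, hc, hd, ih, ok3_eq, Ne.symm hc]
      · simp [okFrom, hc, hd, ih, ok3_eq, Ne.symm hc, Ne.symm hd]

theorem dropWhile_head_false {p : Char → Bool} (l : List Char) (c : Char) (b : List Char)
    (h : l.dropWhile p = c :: b) : p c = false := by
  induction l with
  | nil => simp at h
  | cons d t ih =>
    by_cases hd : p d
    · exact ih (by simpa [List.dropWhile, hd] using h)
    · rw [List.dropWhile_cons_of_neg hd] at h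
      cases h; simpa using hd

theorem validA_eq_key (a r : List Char) (ha : '@' ∉ a)
    (hr : r = [] ∨ ∃ b, r = '@' :: b) :
    validA (a ++ r) = okFrom 0 (a ++ r) := by
  rcases hr with hr | ⟨b, hr⟩
  · -- no '@' anywhere
    subst hr
    rw [List.append_nil]
    have hA : validA a = false := by
      simp [validA, isIn_singleton, List.contains_iff_mem, ha]
    rw [hA]
    cases hac : a with
    | nil => rfl
    | cons c t =>
      have hc : c ≠ '@' := by intro h; exact ha (h ▸ hac ▸ List.mem_cons_self ..)
      have ht : '@' ∉ t := fun hm => ha (hac ▸ List.mem_cons_of_mem _ hm)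
      have hok1 : okFrom 1 t = false := by
        have := ok1_skip t [] ht
        simpa using this
      simp [okFrom, hc, hok1]
  · subst hr
    cases a with
    | nil =>
      simp [validA, okFrom, PySem.Chars.startswith, List.isPrefixOf]
    | cons d t =>
      have hd : d ≠ '@' := by intro h; exact ha (h ▸ List.mem_cons_self ..)
      have ht : '@' ∉ t := fun hm => ha (List.mem_cons_of_mem _ hm)
      -- B side
      have hB : okFrom 0 (d :: t ++ '@' :: b) = (!b.contains '@' && b.contains '.') := by
        simp only [List.cons_append, okFrom, if_neg hd]
        rw [ok1_skip t ('@' :: b) ht]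
        simp [okFrom, ok2_eq]
      rw [hB]
      -- A side
      have hmem : PySem.Chars.isIn ['@'] (d :: t ++ '@' :: b) = true := by
        rw [isIn_singleton]
        simp [List.contains_iff_mem]
      have hpre : PySem.Chars.startswith (d :: t ++ '@' :: b) ['@'] = false := by
        simp [PySem.Chars.startswith, List.isPrefixOf]
        exact fun h => absurd h.symm hd
      by_cases hbat : '@' ∈ b
      · -- a second '@' in the tail: split has at least three parts, the match falls through
        have hge : 2 ≤ (d :: t ++ '@' :: b).count '@' := by
          have h1 : 1 ≤ b.count '@' := List.one_le_count_iff.mpr hbat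
          simp only [List.cons_append, List.count_cons, List.count_append, beq_self_eq_true, if_true]
          omega
        have hlen := sg_len (d :: t ++ '@' :: b) []
        have hmatch : (match splitGo (d :: t ++ '@' :: b) [] with
            | [_, p1] => PySem.Chars.isIn ['.'] p1
            | _ => false) = false := by
          rcases hsp : splitGo (d :: t ++ '@' :: b) [] with _ | ⟨x, _ | ⟨y, _ | _⟩⟩ <;>
            simp_all
        simp only [List.cons_append] at hmatch
        simp [validA, hmatch, hbat]
      · -- exactly one '@': split is [d :: t, b]
        have hsp : splitGo (d :: t ++ '@' :: b) [] = [d :: t, b] := by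
          have := sg_split (d :: t) b [] ha hbat
          simpa using this
        cases hbc : b with
        | nil =>
          subst hbc
          simp only [List.cons_append] at hsp
          simp [validA, hsp, isIn_singleton]
        | cons e b' =>
          subst hbc
          have hlast : (e :: b').getLast (by simp) ≠ '@' := by
            intro h
            exact hbat (h ▸ List.getLast_mem _)
          have hsuf : PySem.Chars.endswith (d :: t ++ '@' :: e :: b') ['@'] = false := by
            have hdecomp : d :: t ++ '@' :: e :: b' =
                (d :: t ++ '@' :: (e :: b').dropLast) ++ [(e :: b').getLast (by simp)] := by
              conv_lhs => rw [← List.dropLast_append_getLast (l := e :: b') (by simp)]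
              simp
            rw [hdecomp]
            simp [PySem.Chars.endswith, List.isSuffixOf, List.reverse_append, List.isPrefixOf]
            exact fun h => absurd h.symm hlast
          simp only [List.cons_append] at hsp hsuf hmem hpre
          simp [validA, hmem, hpre, hsuf, hsp, isIn_singleton, List.contains_iff_mem, hbat]

theorem validA_eq_okFrom (l : List Char) : validA l = okFrom 0 l := by
  have hsplit := List.takeWhile_append_dropWhile
    (p := fun c => decide (c ≠ '@')) (l := l)
  have hamem : '@' ∉ l.takeWhile (fun c => decide (c ≠ '@')) := by
    intro hm
    have := List.mem_takeWhile_imp hm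
    simp at this
  have hr : l.dropWhile (fun c => decide (c ≠ '@')) = [] ∨
      ∃ b, l.dropWhile (fun c => decide (c ≠ '@')) = '@' :: b := by
    cases hdw : l.dropWhile (fun c => decide (c ≠ '@')) with
    | nil => exact Or.inl rfl
    | cons c b =>
      have := dropWhile_head_false (p := fun c => decide (c ≠ '@')) l c b hdw
      simp at this
      exact Or.inr ⟨b, by rw [this]⟩
  rw [← hsplit]
  exact validA_eq_key _ _ hamem hr

theorem bodyEq (count : Int) (email : String) :
    (if PySem.Str.isIn "@" email && !(PySem.Str.startswith email "@") && !(PySem.Str.endswith email "@") then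
      match PySem.Str.split? email "@" with
      | some [_, p1] => if PySem.Str.isIn "." p1 then count + 1 else count
      | _ => count
    else count) = if pyOk email then count + 1 else count := by
  have hat : ("@" : String).toList = ['@'] := rfl
  have hdot : (("." : String)).toList = ['.'] := rfl
  rw [show pyOk email = validA email.toList from (validA_eq_okFrom email.toList).symm]
  rcases hsp : splitGo email.toList [] with _ | ⟨p0, _ | ⟨p1, _ | _⟩⟩ <;>
    simp only [PySem.Str.isIn, PySem.Str.startswith, PySem.Str.endswith, PySem.Str.split?,
      PySem.Chars.split?, hat, hdot, List.isEmpty_cons, Bool.false_eq_true, if_false,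
      splitOn_char, validA, hsp, Option.map_some, List.map_cons, List.map_nil] <;>
    simp [String.toList_ofList] <;>
    by_cases h1 : PySem.Chars.isIn ['@'] email.toList <;>
    by_cases h2 : PySem.Chars.startswith email.toList ['@'] <;>
    by_cases h3 : PySem.Chars.endswith email.toList ['@'] <;>
    simp [h1, h2, h3]

theorem counts_eq (emails : List String) :
    count_valid_emails emails = count_valid_emails_alt emails := by
  unfold count_valid_emails count_valid_emails_alt
  have hbody : (fun (count : Int) (email : String) =>
      if PySem.Str.isIn "@" email && !(PySem.Str.startswith email "@") && !(PySem.Str.endswith email "@") then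
        match PySem.Str.split? email "@" with
        | some [_, p1] => if PySem.Str.isIn "." p1 then count + 1 else count
        | _ => count
      else count) = fun (count : Int) (email : String) =>
        if pyOk email then count + 1 else count := by
    funext count email
    exact bodyEq count email
  rw [hbody, PySem.List.foldl_count_if pyOk emails 0]
  simp [Int.ofNat_eq_natCast]

-- ===== VERDICT (by name: the statement is the Claim_ definition above) =====
theorem count_valid_emails_spec : Claim_equal_count_valid_emails := by
  intro emails _
  unfold Spec_count_valid_emails
  exact counts_eq emails
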